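-- pv_equiv track=rewrite | github.com/CarlottaGiacchetta/AlphatensorFinal | prove/prova_action_space.py | generate_action_space_vecchio
-- ===== SOURCE A (Python) =====
-- def generate_action_space_vecchio(S, coefficients=[-1, 0, 1]):
--     indices = list(range(S))
--     coefficient_list = coefficients
--     action_space = []
--     for u_idx in indices:
--         for v_idx in indices:
--             for w_idx in indices:
--                 for u_coeff in coefficient_list:
--                     for v_coeff in coefficient_list:
--                         for w_coeff in coefficient_list:
--                             if not (u_coeff == v_coeff == w_coeff == 0):
--                                 action = {
--                                     'u': (u_idx, u_coeff),
--                                     'v': (v_idx, v_coeff),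
--                                     'w': (w_idx, w_coeff)
--                                 }
--                                 action_space.append(action)
--     return action_space
-- ===== SOURCE B (Python) =====
-- def generate_action_space_vecchio(S, coefficients=[-1, 0, 1]):
--     # single flat loop over a mixed-radix index space; each counter i decodes to
--     # (u, v, w) and three coefficient positions by successive floor-divisions
--     k = len(coefficients)
--     out = []
--     append = out.append
--     for i in range(S * S * S * k * k * k):
--         c = coefficients[i % k]; i //= k
--         b = coefficients[i % k]; i //= k
--         a = coefficients[i % k]; i //= k
--         w = i % S; i //= S
--         v = i % S; u = i // S
--         if a == b == c == 0:
--             continue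
--         append({'u': (u, a), 'v': (v, b), 'w': (w, c)})
--     return out
-- ===== Notes on version B (the rewrite author's own statement) =====
-- stated objective: alternative
-- what changed: Replaces A's six nested loops by a single flat loop over one mixed-radix index space range(S^3*k^3), decoding each counter into the six components (u,v,w and three coefficient positions) by successive divmods and indexing the coefficient list, skipping the decoded all-zero coefficient triples.
import Mathlib
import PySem

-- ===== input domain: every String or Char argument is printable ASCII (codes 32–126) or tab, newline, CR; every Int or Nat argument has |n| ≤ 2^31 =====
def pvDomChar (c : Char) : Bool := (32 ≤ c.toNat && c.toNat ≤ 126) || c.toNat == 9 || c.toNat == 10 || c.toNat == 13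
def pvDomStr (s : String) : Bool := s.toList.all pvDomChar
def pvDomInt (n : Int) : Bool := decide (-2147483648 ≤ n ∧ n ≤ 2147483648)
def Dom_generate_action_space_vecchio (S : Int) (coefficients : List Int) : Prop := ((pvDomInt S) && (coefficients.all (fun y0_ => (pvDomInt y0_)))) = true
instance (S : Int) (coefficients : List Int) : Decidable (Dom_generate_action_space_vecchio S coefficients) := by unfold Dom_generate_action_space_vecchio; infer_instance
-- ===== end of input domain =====

-- B replaces A's six nested loops by ONE flat loop over the mixed-radix index space
-- range(S^3*k^3), decoding each counter into the six components by successive divmods;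
-- an alternative decomposition of the same enumeration (same cost, same output order).

-- ===== PORT A =====
def generate_action_space_vecchio (S : Int) (coefficients : List Int) : List (List (String × Int × Int)) :=
  let indices := PySem.List.pyRange 0 S 1
  let coefficient_list := coefficients
  let action_space : List (List (String × Int × Int)) := []
  indices.foldl (fun action_space u_idx =>
    indices.foldl (fun action_space v_idx =>
      indices.foldl (fun action_space w_idx =>
        coefficient_list.foldl (fun action_space u_coeff =>
          coefficient_list.foldl (fun action_space v_coeff =>
            coefficient_list.foldl (fun action_space w_coeff =>
              if !(u_coeff == v_coeff && v_coeff == w_coeff && w_coeff == 0) then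
                action_space ++ [[("u", u_idx, u_coeff), ("v", v_idx, v_coeff), ("w", w_idx, w_coeff)]]
              else action_space)
            action_space)
          action_space)
        action_space)
      action_space)
    action_space)
  action_space

-- ===== PORT B =====
-- the coefficient indexing is always in range (each decoded digit lies in [0,k)), so the
-- pyGetD default 0 is never used; divmod is ported as floordiv/mod (same two values).
def generate_action_space_vecchio_alt (S : Int) (coefficients : List Int) : List (List (String × Int × Int)) :=
  let k : Int := coefficients.length
  (PySem.List.pyRange 0 (S * S * S * k * k * k) 1).foldl (fun out i =>
    let wc := PySem.Int.mod i k
    let i1 := PySem.Int.floordiv i k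
    let vc := PySem.Int.mod i1 k
    let i2 := PySem.Int.floordiv i1 k
    let uc := PySem.Int.mod i2 k
    let i3 := PySem.Int.floordiv i2 k
    let w := PySem.Int.mod i3 S
    let i4 := PySem.Int.floordiv i3 S
    let v := PySem.Int.mod i4 S
    let u := PySem.Int.floordiv i4 S
    let a := PySem.List.pyGetD coefficients uc 0
    let b := PySem.List.pyGetD coefficients vc 0
    let c := PySem.List.pyGetD coefficients wc 0
    if a == b && b == c && c == 0 then out
    else out ++ [[("u", u, a), ("v", v, b), ("w", w, c)]]) []

-- ===== PRECONDITION & SPEC =====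
def Spec_generate_action_space_vecchio (S : Int) (coefficients : List Int) (out : List (List (String × Int × Int))) : Prop := out = generate_action_space_vecchio_alt S coefficients
instance (S : Int) (coefficients : List Int) (out : List (List (String × Int × Int))) : Decidable (Spec_generate_action_space_vecchio S coefficients out) := by unfold Spec_generate_action_space_vecchio; infer_instance

-- ===== CLAIM =====
def Claim_equal_generate_action_space_vecchio : Prop := ∀ (S : Int) (coefficients : List Int), Dom_generate_action_space_vecchio S coefficients → Spec_generate_action_space_vecchio S coefficients (generate_action_space_vecchio S coefficients)

-- ===== LEMMAS AND PROOFS =====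

-- the common normal form both ports are reduced to
def pvRow (u v w a b c : Int) : List (List (String × Int × Int)) :=
  if a == b && b == c && c == 0 then []
  else [[("u", u, a), ("v", v, b), ("w", w, c)]]

def pvNF (S : Int) (cl : List Int) : List (List (String × Int × Int)) :=
  (PySem.List.pyRange 0 S 1).flatMap (fun u =>
    (PySem.List.pyRange 0 S 1).flatMap (fun v =>
      (PySem.List.pyRange 0 S 1).flatMap (fun w =>
        cl.flatMap (fun a => cl.flatMap (fun b => cl.flatMap (fun c => pvRow u v w a b c))))))

-- a fold whose body appends a block per element is a flatMap
theorem pv_foldl_ext_flatMap {α β : Type} (l : List α) (body : List β → α → List β)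
    (g : α → List β) (h : ∀ acc x, body acc x = acc ++ g x) (acc : List β) :
    l.foldl body acc = acc ++ l.flatMap g := by
  induction l generalizing acc with
  | nil => simp
  | cons x t ih => simp [List.foldl_cons, h, ih, List.append_assoc]

theorem pv_flatMap_congr {α β : Type} (l : List α) (f g : α → List β)
    (h : ∀ x ∈ l, f x = g x) : l.flatMap f = l.flatMap g := by
  induction l with
  | nil => rfl
  | cons x t ih => simp only [List.flatMap_cons, h x (by simp), ih fun y hy => h y (by simp [hy])]

-- range(m*n) enumerated flat equals the nested enumeration with mixed-radix encoding
theorem pv_split {β : Type} (n : Int) (hn : 0 < n) (f : Int → List β) :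
    ∀ m : Int, 0 ≤ m →
      (PySem.List.pyRange 0 (m * n) 1).flatMap f =
        (PySem.List.pyRange 0 m 1).flatMap (fun q =>
          (PySem.List.pyRange 0 n 1).flatMap (fun r => f (q * n + r))) := by
  intro m hm
  induction m, hm using Int.le_induction with
  | base =>
      rw [show (0 : Int) * n = 0 by ring]
      have h0 : PySem.List.pyRange 0 0 1 = [] := PySem.List.pyRange_one_eq_nil (by omega)
      simp [h0]
  | succ m hm0 ih =>
      rw [show (m + 1) * n = m * n + n by ring]
      rw [PySem.List.pyRange_one_append 0 (m * n) (m * n + n) (mul_nonneg hm0 hn.le)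
            (by linarith : m * n ≤ m * n + n)]
      rw [PySem.List.pyRange_one_succ_right hm0]
      rw [List.flatMap_append, List.flatMap_append, ih]
      congr 1
      rw [PySem.List.pyRange_one (m * n) (m * n + n), PySem.List.pyRange_one 0 n]
      simp [List.flatMap_map, add_sub_cancel_left]

theorem pv_fdiv (q r n : Int) (h0 : 0 ≤ r) (h1 : r < n) :
    PySem.Int.floordiv (q * n + r) n = q := by
  have hn : 0 < n := lt_of_le_of_lt h0 h1
  rw [PySem.Int.floordiv_eq_ediv_of_pos hn]
  rw [show q * n + r = r + q * n by ring]
  rw [Int.add_mul_ediv_right r q (ne_of_gt hn)]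
  rw [Int.ediv_eq_zero_of_lt h0 h1]
  ring

theorem pv_fmod (q r n : Int) (h0 : 0 ≤ r) (h1 : r < n) :
    PySem.Int.mod (q * n + r) n = r := by
  have hn : 0 < n := lt_of_le_of_lt h0 h1
  rw [PySem.Int.mod_eq_emod_of_pos hn]
  rw [show q * n + r = r + n * q by ring]
  rw [Int.add_mul_emod_self_left]
  exact Int.emod_eq_of_lt h0 h1

-- enumerating a list by index through pyGetD is enumerating the list
theorem pv_flatMap_index {β : Type} (cl : List Int) (F : Int → List β) :
    (PySem.List.pyRange 0 (cl.length : Int) 1).flatMap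
        (fun j => F (PySem.List.pyGetD cl j 0)) = cl.flatMap F := by
  have h := PySem.List.map_pyGetD_pyRange_zero' cl (0 : Int)
  calc (PySem.List.pyRange 0 (cl.length : Int) 1).flatMap
          (fun j => F (PySem.List.pyGetD cl j 0))
      = ((PySem.List.pyRange 0 (cl.length : Int) 1).map
          (fun j => PySem.List.pyGetD cl j 0)).flatMap F := by
        rw [List.flatMap_map]
    _ = cl.flatMap F := by rw [h]

theorem pv_A_eq (S : Int) (cl : List Int) :
    generate_action_space_vecchio S cl = pvNF S cl := by
  unfold generate_action_space_vecchio pvNF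
  simp only []
  set R := PySem.List.pyRange 0 S 1 with hR
  rw [pv_foldl_ext_flatMap (g := fun u => R.flatMap (fun v => R.flatMap (fun w =>
        cl.flatMap (fun a => cl.flatMap (fun b => cl.flatMap (fun c => pvRow u v w a b c))))))]
  · simp
  · intro acc u
    rw [pv_foldl_ext_flatMap (g := fun v => R.flatMap (fun w =>
          cl.flatMap (fun a => cl.flatMap (fun b => cl.flatMap (fun c => pvRow u v w a b c)))))]
    intro acc v
    rw [pv_foldl_ext_flatMap (g := fun w =>
          cl.flatMap (fun a => cl.flatMap (fun b => cl.flatMap (fun c => pvRow u v w a b c))))]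
    intro acc w
    rw [pv_foldl_ext_flatMap (g := fun a =>
          cl.flatMap (fun b => cl.flatMap (fun c => pvRow u v w a b c)))]
    intro acc a
    rw [pv_foldl_ext_flatMap (g := fun b => cl.flatMap (fun c => pvRow u v w a b c))]
    intro acc b
    rw [pv_foldl_ext_flatMap (g := fun c => pvRow u v w a b c)]
    intro acc c
    unfold pvRow
    cases h : (a == b && b == c && c == 0) <;> simp [h]

theorem pv_B_eq (S : Int) (cl : List Int) :
    generate_action_space_vecchio_alt S cl = pvNF S cl := by
  set k : Int := (cl.length : Int) with hk
  have hk0 : 0 ≤ k := by simp [hk]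
  -- the flat fold is a flatMap of the decoding body
  have hflat : generate_action_space_vecchio_alt S cl =
      (PySem.List.pyRange 0 (S * S * S * k * k * k) 1).flatMap (fun i =>
        pvRow (PySem.Int.floordiv (PySem.Int.floordiv (PySem.Int.floordiv (PySem.Int.floordiv (PySem.Int.floordiv i k) k) k) S) S)
              (PySem.Int.mod (PySem.Int.floordiv (PySem.Int.floordiv (PySem.Int.floordiv (PySem.Int.floordiv i k) k) k) S) S)
              (PySem.Int.mod (PySem.Int.floordiv (PySem.Int.floordiv (PySem.Int.floordiv i k) k) k) S)
              (PySem.List.pyGetD cl (PySem.Int.mod (PySem.Int.floordiv (PySem.Int.floordiv i k) k) k) 0)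
              (PySem.List.pyGetD cl (PySem.Int.mod (PySem.Int.floordiv i k) k) 0)
              (PySem.List.pyGetD cl (PySem.Int.mod i k) 0)) := by
    unfold generate_action_space_vecchio_alt
    simp only [← hk]
    rw [pv_foldl_ext_flatMap (l := PySem.List.pyRange 0 (S * S * S * k * k * k) 1)
          (g := fun i =>
        pvRow (PySem.Int.floordiv (PySem.Int.floordiv (PySem.Int.floordiv (PySem.Int.floordiv (PySem.Int.floordiv i k) k) k) S) S)
              (PySem.Int.mod (PySem.Int.floordiv (PySem.Int.floordiv (PySem.Int.floordiv (PySem.Int.floordiv i k) k) k) S) S)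
              (PySem.Int.mod (PySem.Int.floordiv (PySem.Int.floordiv (PySem.Int.floordiv i k) k) k) S)
              (PySem.List.pyGetD cl (PySem.Int.mod (PySem.Int.floordiv (PySem.Int.floordiv i k) k) k) 0)
              (PySem.List.pyGetD cl (PySem.Int.mod (PySem.Int.floordiv i k) k) 0)
              (PySem.List.pyGetD cl (PySem.Int.mod i k) 0))]
    · simp
    · intro acc i
      simp only [pvRow]
      cases h : (PySem.List.pyGetD cl (PySem.Int.mod (PySem.Int.floordiv (PySem.Int.floordiv i k) k) k) 0 ==
                   PySem.List.pyGetD cl (PySem.Int.mod (PySem.Int.floordiv i k) k) 0 &&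
                 PySem.List.pyGetD cl (PySem.Int.mod (PySem.Int.floordiv i k) k) 0 ==
                   PySem.List.pyGetD cl (PySem.Int.mod i k) 0 &&
                 PySem.List.pyGetD cl (PySem.Int.mod i k) 0 == 0) <;> simp [h]
  rw [hflat]
  unfold pvNF
  by_cases hS : S ≤ 0
  · have h1 : PySem.List.pyRange 0 S 1 = [] := PySem.List.pyRange_one_eq_nil hS
    have h3 : S * S * S ≤ 0 := by nlinarith [mul_self_nonneg S]
    have hkk : (0 : Int) ≤ k * k * k := by positivity
    have hN : S * S * S * k * k * k ≤ 0 := by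
      calc S * S * S * k * k * k = (S * S * S) * (k * k * k) := by ring
        _ ≤ 0 := mul_nonpos_of_nonpos_of_nonneg h3 hkk
    have h2 : PySem.List.pyRange 0 (S * S * S * k * k * k) 1 = [] :=
      PySem.List.pyRange_one_eq_nil hN
    simp [h1, h2]
  replace hS : 0 < S := by omega
  by_cases hkpos : 0 < k
  case neg =>
    have hkz : k = 0 := le_antisymm (by omega) hk0
    have hcl : cl = [] := by
      have hInt : (cl.length : Int) = 0 := by rw [← hk, hkz]
      have hlen : cl.length = 0 := by exact_mod_cast hInt
      simpa using hlen
    subst hcl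
    simp only [hkz]
    rw [show S * S * S * 0 * 0 * 0 = 0 by ring]
    simp [PySem.List.pyRange_one_eq_nil (le_refl (0 : Int))]
  case pos =>
    -- five mixed-radix splits
    rw [pv_split k hkpos _ (S * S * S * k * k) (by positivity)]
    rw [pv_split k hkpos _ (S * S * S * k) (by positivity)]
    rw [pv_split k hkpos _ (S * S * S) (by positivity)]
    rw [pv_split S hS _ (S * S) (by positivity)]
    rw [pv_split S hS _ S hS.le]
    apply pv_flatMap_congr; intro u hu
    apply pv_flatMap_congr; intro v hv
    apply pv_flatMap_congr; intro w hw
    rw [PySem.List.mem_pyRange_one] at hu hv hw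
    -- decode the index part
    have e3 : ∀ x : Int, (u * S + v) * S + w + x = ((u * S + v) * S + w) + x := fun x => rfl
    -- convert the three coefficient-index levels, after simplifying the divmods
    have hbody : ∀ a ∈ PySem.List.pyRange 0 k 1, ∀ b ∈ PySem.List.pyRange 0 k 1,
        ∀ c ∈ PySem.List.pyRange 0 k 1,
        pvRow (PySem.Int.floordiv (PySem.Int.floordiv (PySem.Int.floordiv (PySem.Int.floordiv (PySem.Int.floordiv (((((u * S + v) * S + w) * k + a) * k + b) * k + c) k) k) k) S) S)
              (PySem.Int.mod (PySem.Int.floordiv (PySem.Int.floordiv (PySem.Int.floordiv (PySem.Int.floordiv (((((u * S + v) * S + w) * k + a) * k + b) * k + c) k) k) k) S) S)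
              (PySem.Int.mod (PySem.Int.floordiv (PySem.Int.floordiv (PySem.Int.floordiv (((((u * S + v) * S + w) * k + a) * k + b) * k + c) k) k) k) S)
              (PySem.List.pyGetD cl (PySem.Int.mod (PySem.Int.floordiv (PySem.Int.floordiv (((((u * S + v) * S + w) * k + a) * k + b) * k + c) k) k) k) 0)
              (PySem.List.pyGetD cl (PySem.Int.mod (PySem.Int.floordiv (((((u * S + v) * S + w) * k + a) * k + b) * k + c) k) k) 0)
              (PySem.List.pyGetD cl (PySem.Int.mod (((((u * S + v) * S + w) * k + a) * k + b) * k + c) k) 0)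
        = pvRow u v w (PySem.List.pyGetD cl a 0) (PySem.List.pyGetD cl b 0) (PySem.List.pyGetD cl c 0) := by
      intro a ha b hb c hc
      rw [PySem.List.mem_pyRange_one] at ha hb hc
      rw [pv_fmod _ _ _ hc.1 hc.2, pv_fdiv _ _ _ hc.1 hc.2]
      rw [pv_fmod _ _ _ hb.1 hb.2, pv_fdiv _ _ _ hb.1 hb.2]
      rw [pv_fmod _ _ _ ha.1 ha.2, pv_fdiv _ _ _ ha.1 ha.2]
      rw [pv_fmod _ _ _ hw.1 hw.2, pv_fdiv _ _ _ hw.1 hw.2]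
      rw [pv_fmod _ _ _ hv.1 hv.2, pv_fdiv _ _ _ hv.1 hv.2]
    calc (PySem.List.pyRange 0 k 1).flatMap (fun a =>
            (PySem.List.pyRange 0 k 1).flatMap (fun b =>
              (PySem.List.pyRange 0 k 1).flatMap (fun c =>
                pvRow (PySem.Int.floordiv (PySem.Int.floordiv (PySem.Int.floordiv (PySem.Int.floordiv (PySem.Int.floordiv (((((u * S + v) * S + w) * k + a) * k + b) * k + c) k) k) k) S) S)
                      (PySem.Int.mod (PySem.Int.floordiv (PySem.Int.floordiv (PySem.Int.floordiv (PySem.Int.floordiv (((((u * S + v) * S + w) * k + a) * k + b) * k + c) k) k) k) S) S)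
                      (PySem.Int.mod (PySem.Int.floordiv (PySem.Int.floordiv (PySem.Int.floordiv (((((u * S + v) * S + w) * k + a) * k + b) * k + c) k) k) k) S)
                      (PySem.List.pyGetD cl (PySem.Int.mod (PySem.Int.floordiv (PySem.Int.floordiv (((((u * S + v) * S + w) * k + a) * k + b) * k + c) k) k) k) 0)
                      (PySem.List.pyGetD cl (PySem.Int.mod (PySem.Int.floordiv (((((u * S + v) * S + w) * k + a) * k + b) * k + c) k) k) 0)
                      (PySem.List.pyGetD cl (PySem.Int.mod (((((u * S + v) * S + w) * k + a) * k + b) * k + c) k) 0))))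
        = (PySem.List.pyRange 0 k 1).flatMap (fun a =>
            (PySem.List.pyRange 0 k 1).flatMap (fun b =>
              (PySem.List.pyRange 0 k 1).flatMap (fun c =>
                pvRow u v w (PySem.List.pyGetD cl a 0) (PySem.List.pyGetD cl b 0) (PySem.List.pyGetD cl c 0)))) := by
          apply pv_flatMap_congr; intro a ha
          apply pv_flatMap_congr; intro b hb
          apply pv_flatMap_congr; intro c hc
          exact hbody a ha b hb c hc
      _ = cl.flatMap (fun a => cl.flatMap (fun b => cl.flatMap (fun c => pvRow u v w a b c))) := by
          refine Eq.trans (pv_flatMap_index cl (fun a =>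
            (PySem.List.pyRange 0 k 1).flatMap (fun b =>
              (PySem.List.pyRange 0 k 1).flatMap (fun c =>
                pvRow u v w a (PySem.List.pyGetD cl b 0) (PySem.List.pyGetD cl c 0))))) ?_
          apply pv_flatMap_congr; intro a _
          refine Eq.trans (pv_flatMap_index cl (fun b =>
            (PySem.List.pyRange 0 k 1).flatMap (fun c =>
              pvRow u v w a b (PySem.List.pyGetD cl c 0)))) ?_
          apply pv_flatMap_congr; intro b _
          exact pv_flatMap_index cl (fun c => pvRow u v w a b c)

-- ===== VERDICT =====
theorem generate_action_space_vecchio_spec : Claim_equal_generate_action_space_vecchio := by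
  intro S cl _
  unfold Spec_generate_action_space_vecchio
  rw [pv_A_eq, pv_B_eq]
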